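-- pv_equiv track=rewrite | github.com/enricotomasi/GeeksforGeeks_problems | Easy/Diamond in a Bag.py | minScale
-- ===== SOURCE A (Python) =====
-- def minScale(N):
--     # code here
--     if N == 1:
--         return 0
--
--     if N >=2 and N <= 3:
--         return 1
--
--     ans = 0
--     prod = 1
--
--     while prod < N:
--         ans += 1
--         prod *= 3
--
--     return ans
-- ===== SOURCE B (Python) =====
-- def minScale(N):
--     # Shrink N by ceiling-division by 3 instead of growing a power of 3.
--     k = 0
--     while N > 1:
--         N = -(-N // 3)
--         k += 1
--     return k
-- ===== Notes on version B (the rewrite author's own statement) =====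
-- stated objective: simpler
-- what changed: Instead of multiplying an accumulating power of 3 up to N (plus two special-case early returns), B repeatedly replaces N by its ceiling third and counts the steps, with no special cases.
import Mathlib
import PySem

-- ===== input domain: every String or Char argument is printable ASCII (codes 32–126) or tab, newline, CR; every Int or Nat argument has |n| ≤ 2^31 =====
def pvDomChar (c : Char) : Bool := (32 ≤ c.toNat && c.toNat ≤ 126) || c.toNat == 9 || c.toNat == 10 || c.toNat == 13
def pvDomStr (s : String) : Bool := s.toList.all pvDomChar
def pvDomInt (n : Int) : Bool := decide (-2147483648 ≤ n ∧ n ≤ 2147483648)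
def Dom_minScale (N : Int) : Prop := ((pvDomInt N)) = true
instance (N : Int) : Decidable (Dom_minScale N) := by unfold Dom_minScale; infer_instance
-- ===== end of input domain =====

-- B multiplies nothing: instead of growing a power of 3 up to N (A, plus two special cases),
-- B repeatedly replaces N by ceil(N/3) and counts the steps. Same cost, no special cases.

-- ===== PORT A =====
-- the 'while prod < N' loop; 'h : 1 ≤ prod' is an invariant carried only for termination
def minScaleLoop (N ans prod : Int) (h : 1 ≤ prod) : Int :=
  if hlt : prod < N then minScaleLoop N (ans + 1) (prod * 3) (by omega)
  else ans
termination_by (N - prod).toNat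
decreasing_by omega

def minScale (N : Int) : Int :=
  if N = 1 then 0
  else if 2 ≤ N ∧ N ≤ 3 then 1
  else minScaleLoop N 0 1 (by omega)

-- ===== PORT B =====
-- the 'while N > 1' loop of Source B; N becomes -(-N // 3) = ceil(N/3) each step
def minScaleAltLoop (N k : Int) : Int :=
  if h : 1 < N then minScaleAltLoop (-(PySem.Int.floordiv (-N) 3)) (k + 1)
  else k
termination_by N.toNat
decreasing_by
  have he := PySem.Int.floordiv_eq_ediv_of_pos (a := -N) (b := 3) (by omega)
  rw [he]; omega

def minScale_alt (N : Int) : Int := minScaleAltLoop N 0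

-- ===== PRECONDITION & SPEC =====
def Spec_minScale (N : Int) (out : Int) : Prop := out = minScale_alt N
instance (N : Int) (out : Int) : Decidable (Spec_minScale N out) := by unfold Spec_minScale; infer_instance

-- ===== CLAIM (what is proved, stated in full; the proofs are below) =====
def Claim_equal_minScale : Prop := ∀ (N : Int), Dom_minScale N → Spec_minScale N (minScale N)

-- ===== LEMMAS AND PROOFS =====

theorem loopA_base (N ans prod : Int) (h : 1 ≤ prod) (hn : ¬ prod < N) :
    minScaleLoop N ans prod h = ans := by
  rw [minScaleLoop]; simp [hn]

theorem loopA_step (N ans prod : Int) (h : 1 ≤ prod) (hp : 1 ≤ prod * 3) (hlt : prod < N) :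
    minScaleLoop N ans prod h = minScaleLoop N (ans + 1) (prod * 3) hp := by
  rw [minScaleLoop]; simp [hlt]

theorem loopB_base (N k : Int) (hn : ¬ 1 < N) : minScaleAltLoop N k = k := by
  rw [minScaleAltLoop]; simp [hn]

theorem loopB_step (N k : Int) (hlt : 1 < N) :
    minScaleAltLoop N k = minScaleAltLoop (-(PySem.Int.floordiv (-N) 3)) (k + 1) := by
  rw [minScaleAltLoop]; simp [hlt]

-- the counter of A's loop is a pure accumulator
theorem minScaleLoop_shift (N : Int) : ∀ (fuel : Nat) (prod : Int) (h : 1 ≤ prod),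
    (N - prod).toNat ≤ fuel → ∀ ans, minScaleLoop N ans prod h = ans + minScaleLoop N 0 prod h := by
  intro fuel
  induction fuel with
  | zero =>
    intro prod h hf ans
    rw [loopA_base _ _ _ _ (by omega), loopA_base _ _ _ _ (by omega)]
    ring
  | succ n ih =>
    intro prod h hf ans
    by_cases hlt : prod < N
    · rw [loopA_step _ ans _ _ (by omega) hlt, loopA_step _ 0 _ _ (by omega) hlt,
        ih (prod * 3) (by omega) (by omega) (ans + 1), ih (prod * 3) (by omega) (by omega) (0 + 1)]
      ring
    · rw [loopA_base _ _ _ _ hlt, loopA_base _ _ _ _ hlt]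
      ring

-- the counter of B's loop is a pure accumulator
theorem minScaleAltLoop_shift : ∀ (fuel : Nat) (N : Int), N.toNat ≤ fuel →
    ∀ k, minScaleAltLoop N k = k + minScaleAltLoop N 0 := by
  intro fuel
  induction fuel with
  | zero =>
    intro N hf k
    rw [loopB_base _ _ (by omega), loopB_base _ _ (by omega)]
    ring
  | succ n ih =>
    intro N hf k
    by_cases hlt : 1 < N
    · have he := PySem.Int.floordiv_eq_ediv_of_pos (a := -N) (b := 3) (by omega)
      rw [loopB_step _ k hlt, loopB_step _ 0 hlt,
        ih _ (by rw [he]; omega) (k + 1), ih _ (by rw [he]; omega) (0 + 1)]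
      ring
    · rw [loopB_base _ _ hlt, loopB_base _ _ hlt]
      ring

-- running A's loop at prod*3 equals running it at prod against the shrunk bound ceil(N/3)
theorem minScaleLoop_shrink (N : Int) : ∀ (fuel : Nat) (prod : Int) (h : 1 ≤ prod) (hp : 1 ≤ prod * 3),
    (N - prod).toNat ≤ fuel → ∀ ans,
    minScaleLoop N ans (prod * 3) hp =
      minScaleLoop (-(PySem.Int.floordiv (-N) 3)) ans prod h := by
  intro fuel
  induction fuel with
  | zero =>
    intro prod h hp hf ans
    have he := PySem.Int.floordiv_eq_ediv_of_pos (a := -N) (b := 3) (by omega)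
    rw [loopA_base _ _ _ _ (by omega), loopA_base _ _ _ _ (by rw [he]; omega)]
  | succ n ih =>
    intro prod h hp hf ans
    have he := PySem.Int.floordiv_eq_ediv_of_pos (a := -N) (b := 3) (by omega)
    by_cases hlt : prod * 3 < N
    · have hlt' : prod < -(PySem.Int.floordiv (-N) 3) := by rw [he]; omega
      rw [loopA_step _ ans _ _ (by omega) hlt, loopA_step _ ans _ _ (by omega) hlt']
      exact ih (prod * 3) (by omega) (by omega) (by omega) (ans + 1)
    · have hlt' : ¬ prod < -(PySem.Int.floordiv (-N) 3) := by rw [he]; omega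
      rw [loopA_base _ _ _ _ hlt, loopA_base _ _ _ _ hlt']

-- the two loops started fresh agree (strong induction on N)
theorem loops_agree : ∀ (fuel : Nat) (N : Int), N.toNat ≤ fuel →
    minScaleLoop N 0 1 (by omega) = minScaleAltLoop N 0 := by
  intro fuel
  induction fuel with
  | zero =>
    intro N hf
    rw [loopA_base _ _ _ _ (by omega), loopB_base _ _ (by omega)]
  | succ n ih =>
    intro N hf
    by_cases hlt : (1 : Int) < N
    · have he := PySem.Int.floordiv_eq_ediv_of_pos (a := -N) (b := 3) (by omega)
      rw [loopA_step _ 0 _ _ (by omega) hlt,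
        minScaleLoop_shrink N ((N - 1).toNat) 1 (by omega) (by omega) (by omega) (0 + 1),
        minScaleLoop_shift _ ((-(PySem.Int.floordiv (-N) 3)) - 1).toNat 1 (by omega) (by omega) (0 + 1),
        ih _ (by rw [he]; omega),
        loopB_step _ 0 hlt,
        minScaleAltLoop_shift (-(PySem.Int.floordiv (-N) 3)).toNat _ (le_refl _) (0 + 1)]
    · rw [loopA_base _ _ _ _ (by omega), loopB_base _ _ hlt]

-- A's special-case branches coincide with its own loop
theorem minScale_eq_loop (N : Int) : minScale N = minScaleLoop N 0 1 (by omega) := by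
  unfold minScale
  by_cases h1 : N = 1
  · subst h1
    rw [if_pos rfl, loopA_base _ _ _ _ (by omega)]
  · rw [if_neg h1]
    by_cases h2 : 2 ≤ N ∧ N ≤ 3
    · rw [if_pos h2, loopA_step _ 0 _ _ (by omega) (by omega),
        loopA_base _ _ _ _ (by omega)]
      omega
    · rw [if_neg h2]

-- ===== VERDICT (by name: the statement is the Claim_ definition above) =====
theorem minScale_spec : Claim_equal_minScale := by
  intro N _
  unfold Spec_minScale minScale_alt
  rw [minScale_eq_loop]
  exact loops_agree N.toNat N (le_refl _)
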